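-- pv_equiv track=rewrite | github.com/johnBuffer/Advent-Of-Code | 2024/12/solve.py | extractSide
-- ===== SOURCE A (Python) =====
-- def extractSide(nrm, l):
--     dir, lvl, res = bool(nrm[0]), bool(nrm[1]), 0
--     while l:
--         p0 = l.pop()
--         a, b, found = p0[dir], p0[dir], True
--         while found:
--             found = False
--             for p1 in l:
--                 if p1[lvl] == p0[lvl] and p1[dir] in (a-1, b+1):
--                     l.remove(p1)
--                     a, b, found = min(a, p1[dir]), max(b, p1[dir]), True
--             if not found:
--                 res += 1
--     return res
-- ===== SOURCE B (Python) =====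
-- def extractSide(nrm, l):
--     d = 1 if nrm[0] else 0
--     lv = 1 if nrm[1] else 0
--     c = {}
--     for p in l:
--         k = (p[lv], p[d])
--         c[k] = c.get(k, 0) + 1
--     res = 0
--     for (L, v), m in c.items():
--         res += max(0, m - c.get((L, v - 1), 0))
--     return res
-- ===== Notes on version B (the rewrite author's own statement) =====
-- stated objective: faster
-- what changed: Replaces the quadratic pop/rescan/remove peeling of contiguous segments by a single counting pass: build a counter of (level,value) keys and sum max(0, count(level,v) - count(level,v-1)), which counts exactly the segment starts.
import Mathlib
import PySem

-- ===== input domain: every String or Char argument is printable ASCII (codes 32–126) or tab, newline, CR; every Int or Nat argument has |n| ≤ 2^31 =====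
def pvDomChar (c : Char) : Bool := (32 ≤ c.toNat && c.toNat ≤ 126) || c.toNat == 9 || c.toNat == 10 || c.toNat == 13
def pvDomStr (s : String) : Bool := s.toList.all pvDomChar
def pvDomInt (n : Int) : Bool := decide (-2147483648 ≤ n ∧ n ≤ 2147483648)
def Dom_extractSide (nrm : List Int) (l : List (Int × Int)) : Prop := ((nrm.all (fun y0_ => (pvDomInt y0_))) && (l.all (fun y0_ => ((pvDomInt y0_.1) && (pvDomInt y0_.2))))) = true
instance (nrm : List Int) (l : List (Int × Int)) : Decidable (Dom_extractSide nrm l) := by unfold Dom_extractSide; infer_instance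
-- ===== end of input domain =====

-- B replaces A's quadratic pop/rescan/remove peeling by one counting pass over (level,value) keys,
-- summing max(0, count(L,v) - count(L,v-1)); equivalence proved on the RETURN value only (A empties
-- the list l in place, B does not mutate it).

-- ===== PORT A =====
-- p[i] with i a Python bool (False→0, True→1) on a pair
def pvIdx (b : Bool) (p : Int × Int) : Int := if b then p.2 else p.1

-- the `for p1 in l` loop body with Python's iterator-index semantics (l.remove shifts the
-- iteration index, so the element after a removed one is skipped); k is the iterator index.
-- fuel only makes the recursion structural: l.length - k strictly decreases each step, so
-- any fuel with l.length ≤ k + fuel reproduces the Python loop exactly.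
def pvScanA (d lv : Bool) (L : Int) : Nat → List (Int × Int) → Nat → Int → Int → Bool →
    List (Int × Int) × Int × Int × Bool
  | 0, l, _, a, b, found => (l, a, b, found)
  | fuel + 1, l, k, a, b, found =>
    if h : k < l.length then
      let p1 := l[k]
      if pvIdx lv p1 = L ∧ (pvIdx d p1 = a - 1 ∨ pvIdx d p1 = b + 1) then
        -- l.remove(p1); p1 ∈ l so remove? succeeds and equals l.erase p1
        pvScanA d lv L fuel ((PySem.List.remove? l p1).getD l) (k + 1)
          (min a (pvIdx d p1)) (max b (pvIdx d p1)) true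
      else
        pvScanA d lv L fuel l (k + 1) a b found
    else (l, a, b, found)

-- the `while found` loop; returns (remaining l, res) with res incremented once on exit
-- (Python's `if not found: res += 1`); every pass with found = true removed an element,
-- so any fuel with l.length < fuel reproduces the Python loop exactly.
def pvInnerA (d lv : Bool) (L : Int) : Nat → List (Int × Int) → Int → Int → Int →
    List (Int × Int) × Int
  | 0, l, _, _, res => (l, res)
  | fuel + 1, l, a, b, res =>
    match pvScanA d lv L l.length l 0 a b false with
    | (l', a', b', found) =>
      if found then pvInnerA d lv L fuel l' a' b' res
      else (l', res + 1)

-- the outer `while l` loop; each pass pops an element, so l.length < fuel suffices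
def pvOuterA (d lv : Bool) : Nat → List (Int × Int) → Int → Int
  | 0, _, res => res
  | fuel + 1, l, res =>
    if h : l = [] then res
    else
      let p0 := l.getLast h
      match pvInnerA d lv (pvIdx lv p0) (l.dropLast.length + 1) l.dropLast
          (pvIdx d p0) (pvIdx d p0) res with
      | (l2, res2) => pvOuterA d lv fuel l2 res2

def extractSide (nrm : List Int) (l : List (Int × Int)) : Int :=
  -- bool(nrm[0]) / bool(nrm[1]); the indices are in range under Pre_
  let d : Bool := decide (PySem.List.pyGetD nrm 0 0 ≠ 0)
  let lv : Bool := decide (PySem.List.pyGetD nrm 1 0 ≠ 0)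
  pvOuterA d lv (l.length + 1) l 0

-- ===== PORT B =====
-- p[i] with i ∈ {0, 1} on a pair (Source B uses integer indices)
def pvIdxB (i : Int) (p : Int × Int) : Int := if i = 1 then p.2 else p.1

def extractSide_alt (nrm : List Int) (l : List (Int × Int)) : Int :=
  let d : Int := if PySem.List.pyGetD nrm 0 0 ≠ 0 then 1 else 0
  let lv : Int := if PySem.List.pyGetD nrm 1 0 ≠ 0 then 1 else 0
  let c : PySem.Dict (Int × Int) Int :=
    l.foldl (fun c p =>
      let k := (pvIdxB lv p, pvIdxB d p)
      c.insert k (c.getD k 0 + 1)) PySem.Dict.empty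
  c.items.foldl (fun res kv => res + max 0 (kv.2 - c.getD (kv.1.1, kv.1.2 - 1) 0)) 0

-- ===== PRECONDITION & SPEC =====
-- Pre_ excludes exactly the inputs where the Python A raises IndexError (nrm shorter than 2).
def Pre_extractSide (nrm : List Int) (l : List (Int × Int)) : Prop := 2 ≤ nrm.length
instance (nrm : List Int) (l : List (Int × Int)) : Decidable (Pre_extractSide nrm l) := by
  unfold Pre_extractSide; infer_instance

def pvWitness_extractSide : List Int × (List (Int × Int)) := ([1, 0], [(0, 0), (0, 1), (2, 5)])

def Spec_extractSide (nrm : List Int) (l : List (Int × Int)) (out : Int) : Prop := out = extractSide_alt nrm l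
instance (nrm : List Int) (l : List (Int × Int)) (out : Int) : Decidable (Spec_extractSide nrm l out) := by unfold Spec_extractSide; infer_instance

-- ===== CLAIM (what is proved, stated in full; the proofs are below) =====
def Claim_equal_extractSide : Prop := ∀ (nrm : List Int) (l : List (Int × Int)), Dom_extractSide nrm l → Pre_extractSide nrm l → Spec_extractSide nrm l (extractSide nrm l)

-- ===== LEMMAS AND PROOFS =====

-- the (level, value) key of a point
def pvKey (d lv : Bool) (p : Int × Int) : Int × Int := (pvIdx lv p, pvIdx d p)

-- multiplicity of a key, as an Int
def pvCnt (ks : List (Int × Int)) (κ : Int × Int) : Int := (ks.count κ : Int)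

-- the segment count read off a multiplicity function, over a list S of keys
def pvPhi (c : Int × Int → Int) (S : List (Int × Int)) : Int :=
  (S.map (fun κ => max 0 (c κ - c (κ.1, κ.2 - 1)))).sum

theorem pvPhi_subset (c : Int × Int → Int) (S S' : List (Int × Int))
    (hn : S.Nodup) (hn' : S'.Nodup) (hsub : ∀ κ ∈ S, κ ∈ S')
    (hc : ∀ κ, 0 ≤ c κ) (hz : ∀ κ ∈ S', κ ∉ S → c κ = 0) :
    pvPhi c S = pvPhi c S' := by
  unfold pvPhi
  rw [← List.sum_toFinset _ hn, ← List.sum_toFinset _ hn']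
  refine Finset.sum_subset (fun κ hκ => ?_) (fun κ hκ hκn => ?_)
  · simp only [List.mem_toFinset] at *; exact hsub κ hκ
  · simp only [List.mem_toFinset] at hκ hκn
    have h0 : c κ = 0 := hz κ hκ hκn
    have h1 : 0 ≤ c (κ.1, κ.2 - 1) := hc _
    rw [h0]
    omega

theorem pvPhi_drop (c c' : Int × Int → Int) (S : List (Int × Int)) (L A B : Int)
    (hAB : A ≤ B)
    (hrel : ∀ κ, c' κ = c κ - (if κ.1 = L ∧ A ≤ κ.2 ∧ κ.2 ≤ B then 1 else 0))
    (hc' : ∀ κ, 0 ≤ c' κ)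
    (hA : c (L, A - 1) = 0) (hB : c (L, B + 1) = 0)
    (hmem : (L, A) ∈ S) (hn : S.Nodup) :
    pvPhi c S = pvPhi c' S + 1 := by
  have key : ∀ κ : Int × Int,
      max 0 (c κ - c (κ.1, κ.2 - 1)) =
      max 0 (c' κ - c' (κ.1, κ.2 - 1)) + (if κ = (L, A) then 1 else 0) := by
    rintro ⟨x, y⟩
    have h1 := hrel (x, y); have h2 := hrel (x, y - 1)
    have h3 := hc' (x, y); have h4 := hc' (x, y - 1)
    simp only [Prod.mk.injEq] at *
    by_cases hx : x = L
    · subst hx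
      by_cases hyA : y = A
      · subst hyA
        rw [hA] at h2 ⊢
        split_ifs at h1 h2 ⊢ <;> omega
      · by_cases hyB : y = B + 1
        · subst hyB
          rw [hB] at h1 ⊢
          split_ifs at h1 h2 ⊢ <;> omega
        · split_ifs at h1 h2 ⊢ <;> omega
    · split_ifs at h1 h2 ⊢ <;> omega
  unfold pvPhi
  calc (S.map (fun κ => max 0 (c κ - c (κ.1, κ.2 - 1)))).sum
      = (S.map (fun κ => max 0 (c' κ - c' (κ.1, κ.2 - 1)) + (if κ = (L, A) then 1 else 0))).sum := by
        congr 1; exact List.map_congr_left (fun κ _ => key κ)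
    _ = (S.map (fun κ => max 0 (c' κ - c' (κ.1, κ.2 - 1)))).sum + (S.map (fun κ => if κ = (L, A) then (1 : Int) else 0)).sum := by
        rw [← List.sum_map_add]
    _ = (S.map (fun κ => max 0 (c' κ - c' (κ.1, κ.2 - 1)))).sum + 1 := by
        congr 1
        have : (List.map (fun κ => if κ = (L, A) then (1 : Int) else 0) S)
             = (List.map (fun κ => if (κ == (L, A)) = true then (1 : Int) else 0) S) := by
          apply List.map_congr_left; intro κ _; simp
        rw [this, PySem.List.sum_map_ite_one_zero]
        have hcp : S.countP (fun κ => κ == (L, A)) = List.count (L, A) S := by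
          rw [List.count]
        rw [hcp, List.count_eq_one_of_mem hn hmem]
        rfl


theorem pvCnt_nonneg (ks : List (Int × Int)) (κ : Int × Int) : 0 ≤ pvCnt ks κ :=
  Int.natCast_nonneg _

theorem pvCnt_erase (dd llv : Bool) (l : List (Int × Int)) (p : Int × Int) (hp : p ∈ l)
    (κ : Int × Int) :
    pvCnt ((l.erase p).map (pvKey dd llv)) κ =
      pvCnt (l.map (pvKey dd llv)) κ - (if κ = pvKey dd llv p then 1 else 0) := by
  have hperm := (List.perm_cons_erase hp).map (pvKey dd llv)
  unfold pvCnt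
  simp only [List.map_cons] at hperm
  rw [hperm.count_eq, List.count_cons]
  by_cases hk : κ = pvKey dd llv p
  · subst hk
    simp only [beq_self_eq_true, if_true]
    push_cast; ring
  · have hb : (pvKey dd llv p == κ) = false := by
      simp only [beq_eq_false_iff_ne, ne_eq]
      exact fun e => hk e.symm
    rw [hb]
    simp [hk]

theorem pvCnt_eq_zero_of (dd llv : Bool) (l : List (Int × Int)) (κ : Int × Int)
    (h : ∀ p ∈ l, pvKey dd llv p ≠ κ) : pvCnt (l.map (pvKey dd llv)) κ = 0 := by
  unfold pvCnt
  norm_cast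
  rw [List.count_eq_zero]
  intro hmem
  rcases List.mem_map.mp hmem with ⟨p, hp, hkey⟩
  exact h p hp hkey

theorem pvScanA_length (d lv : Bool) (L : Int) (fuel : Nat) (l : List (Int × Int)) (k : Nat)
    (a b : Int) (f : Bool) :
    (pvScanA d lv L fuel l k a b f).1.length < l.length ∨
      pvScanA d lv L fuel l k a b f = (l, a, b, f) := by
  induction fuel generalizing l k a b f with
  | zero => right; rfl
  | succ fuel ih =>
      simp only [pvScanA]
      by_cases h : k < l.length
      · rw [dif_pos h]
        by_cases hc : pvIdx lv l[k] = L ∧ (pvIdx d l[k] = a - 1 ∨ pvIdx d l[k] = b + 1)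
        · rw [if_pos hc]
          have hm : l[k] ∈ l := List.getElem_mem h
          have he : ((PySem.List.remove? l l[k]).getD l) = l.erase l[k] := by
            rw [PySem.List.remove?_eq_some_erase l l[k] hm]; rfl
          rw [he]
          have hlen : (l.erase l[k]).length < l.length := by
            rw [List.length_erase_of_mem hm]
            have := List.length_pos_of_mem hm
            omega
          rcases ih (l.erase l[k]) (k + 1) (min a (pvIdx d l[k])) (max b (pvIdx d l[k])) true
            with h1 | h1
          · left; omega
          · rw [h1]; left; simpa using hlen
        · rw [if_neg hc]; exact ih l (k + 1) a b f
      · rw [dif_neg h]; right; rfl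

theorem pvScanA_found_mono (d lv : Bool) (L : Int) (fuel : Nat) (l : List (Int × Int)) (k : Nat)
    (a b : Int) (f : Bool) (hf : f = true) :
    (pvScanA d lv L fuel l k a b f).2.2.2 = true := by
  induction fuel generalizing l k a b f with
  | zero => simpa [pvScanA] using hf
  | succ fuel ih =>
      simp only [pvScanA]
      by_cases h : k < l.length
      · rw [dif_pos h]
        by_cases hc : pvIdx lv l[k] = L ∧ (pvIdx d l[k] = a - 1 ∨ pvIdx d l[k] = b + 1)
        · rw [if_pos hc]
          exact ih _ _ _ _ _ rfl
        · rw [if_neg hc]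
          exact ih _ _ _ _ _ hf
      · rw [dif_neg h]; simpa using hf

theorem pvScanA_spec (d lv : Bool) (L : Int) (fuel : Nat) (l : List (Int × Int)) (k : Nat)
    (a b : Int) (f : Bool) (hfuel : l.length ≤ k + fuel) (hab : a ≤ b) :
    (pvScanA d lv L fuel l k a b f).2.1 ≤ a ∧ b ≤ (pvScanA d lv L fuel l k a b f).2.2.1 ∧
    (∀ κ : Int × Int,
      pvCnt ((pvScanA d lv L fuel l k a b f).1.map (pvKey d lv)) κ =
      pvCnt (l.map (pvKey d lv)) κ -
        (if κ.1 = L ∧ ((pvScanA d lv L fuel l k a b f).2.1 ≤ κ.2 ∧ κ.2 ≤ a - 1 ∨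
                       b + 1 ≤ κ.2 ∧ κ.2 ≤ (pvScanA d lv L fuel l k a b f).2.2.1) then 1 else 0)) ∧
    ((pvScanA d lv L fuel l k a b f).2.2.2 = false →
      pvScanA d lv L fuel l k a b f = (l, a, b, f) ∧
      ∀ p ∈ l.drop k, ¬(pvIdx lv p = L ∧ (pvIdx d p = a - 1 ∨ pvIdx d p = b + 1))) := by
  induction fuel generalizing l k a b f with
  | zero =>
      simp only [pvScanA]
      refine ⟨le_refl _, le_refl _, ?_, ?_⟩
      · intro κ
        split_ifs with hif
        · omega
        · omega
      · intro _
        refine ⟨by trivial, ?_⟩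
        rw [List.drop_eq_nil_of_le (by omega)]
        intro p hp
        simp at hp
  | succ fuel ih =>
      simp only [pvScanA]
      by_cases h : k < l.length
      · rw [dif_pos h]
        by_cases hc : pvIdx lv l[k] = L ∧ (pvIdx d l[k] = a - 1 ∨ pvIdx d l[k] = b + 1)
        · rw [if_pos hc]
          have hm : l[k] ∈ l := List.getElem_mem h
          have he : ((PySem.List.remove? l l[k]).getD l) = l.erase l[k] := by
            rw [PySem.List.remove?_eq_some_erase l l[k] hm]; rfl
          rw [he]
          have hfuel' : (l.erase l[k]).length ≤ (k + 1) + fuel := by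
            rw [List.length_erase_of_mem hm]; omega
          have hab' : min a (pvIdx d l[k]) ≤ max b (pvIdx d l[k]) := by omega
          obtain ⟨iha, ihb, ihcnt, -⟩ :=
            ih (l.erase l[k]) (k + 1) (min a (pvIdx d l[k])) (max b (pvIdx d l[k])) true
              hfuel' hab'
          have hkey : pvKey d lv l[k] = (L, pvIdx d l[k]) := by
            unfold pvKey; rw [hc.1]
          refine ⟨by omega, by omega, ?_, ?_⟩
          · intro κ
            have h1 := ihcnt κ
            have h2 := pvCnt_erase d lv l l[k] hm κ
            rw [hkey] at h2
            obtain ⟨x, y⟩ := κ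
            simp only [Prod.mk.injEq] at h1 h2 ⊢
            rcases hc.2 with hv | hv <;>
              split_ifs at h1 h2 ⊢ <;> omega
          · intro hf
            rw [pvScanA_found_mono d lv L fuel (l.erase l[k]) (k + 1)
              (min a (pvIdx d l[k])) (max b (pvIdx d l[k])) true rfl] at hf
            simp at hf
        · rw [if_neg hc]
          obtain ⟨iha, ihb, ihcnt, ihnf⟩ := ih l (k + 1) a b f (by omega) hab
          refine ⟨iha, ihb, ihcnt, ?_⟩
          intro hf
          obtain ⟨heq, hnm⟩ := ihnf hf
          refine ⟨heq, ?_⟩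
          rw [List.drop_eq_getElem_cons h]
          intro p hp
          rcases List.mem_cons.mp hp with hp | hp
          · subst hp; exact hc
          · exact hnm p hp
      · rw [dif_neg h]
        refine ⟨le_refl _, le_refl _, ?_, ?_⟩
        · intro κ
          dsimp only
          split_ifs with hif
          · omega
          · omega
        · intro _
          refine ⟨by trivial, ?_⟩
          rw [List.drop_eq_nil_of_le (Nat.le_of_not_lt h)]
          intro p hp
          simp at hp

theorem pvCnt_pos (ks : List (Int × Int)) (κ : Int × Int) : 1 ≤ pvCnt ks κ ↔ κ ∈ ks := by
  unfold pvCnt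
  rw [show (1 : Int) ≤ (List.count κ ks : Int) ↔ 0 < List.count κ ks by omega]
  exact List.count_pos_iff

theorem pvCnt_zero (ks : List (Int × Int)) (κ : Int × Int) : pvCnt ks κ = 0 ↔ κ ∉ ks := by
  unfold pvCnt
  rw [show ((List.count κ ks : Int) = 0 ↔ List.count κ ks = 0) by omega]
  exact List.count_eq_zero

theorem pvInnerA_length (d lv : Bool) (L : Int) (fuel : Nat) (l : List (Int × Int))
    (a b : Int) (res : Int) :
    (pvInnerA d lv L fuel l a b res).1.length ≤ l.length := by
  induction fuel generalizing l a b with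
  | zero => exact le_refl _
  | succ fuel ih =>
      simp only [pvInnerA]
      rcases hr : pvScanA d lv L l.length l 0 a b false with ⟨l2, a2, b2, f2⟩
      have hlen : l2.length ≤ l.length := by
        rcases pvScanA_length d lv L l.length l 0 a b false with h | h <;> rw [hr] at h
        · exact le_of_lt h
        · injection h with h1 _; rw [h1]
      dsimp only
      cases f2
      · simpa using hlen
      · simpa using le_trans (ih l2 a2 b2) hlen

theorem pvInnerA_spec (d lv : Bool) (L : Int) (fuel : Nat) (l : List (Int × Int)) (a b : Int)
    (res : Int) (hfuel : l.length < fuel) (hab : a ≤ b) :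
    (pvInnerA d lv L fuel l a b res).2 = res + 1 ∧
    ∃ A B : Int, A ≤ a ∧ b ≤ B ∧
      (∀ κ : Int × Int,
        pvCnt ((pvInnerA d lv L fuel l a b res).1.map (pvKey d lv)) κ =
        pvCnt (l.map (pvKey d lv)) κ -
          (if κ.1 = L ∧ (A ≤ κ.2 ∧ κ.2 ≤ a - 1 ∨ b + 1 ≤ κ.2 ∧ κ.2 ≤ B) then 1 else 0)) ∧
      pvCnt ((pvInnerA d lv L fuel l a b res).1.map (pvKey d lv)) (L, A - 1) = 0 ∧
      pvCnt ((pvInnerA d lv L fuel l a b res).1.map (pvKey d lv)) (L, B + 1) = 0 := by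
  induction fuel generalizing l a b with
  | zero => omega
  | succ fuel ih =>
      simp only [pvInnerA]
      rcases hr : pvScanA d lv L l.length l 0 a b false with ⟨l2, a2, b2, f2⟩
      have hs := pvScanA_spec d lv L l.length l 0 a b false (by omega) hab
      rw [hr] at hs
      dsimp only at hs ⊢
      obtain ⟨hs1, hs2, hs3, hs4⟩ := hs
      cases f2 with
      | false =>
          obtain ⟨heq, hnm⟩ := hs4 rfl
          injection heq with he1 he2
          injection he2 with he2 he3
          injection he3 with he3 he4
          subst he1; subst he2; subst he3
          simp only [List.drop_zero] at hnm
          simp only [Bool.false_eq_true, if_false]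
          refine ⟨by trivial, a2, b2, le_refl _, le_refl _, ?_, ?_, ?_⟩
          · intro κ
            obtain ⟨x, y⟩ := κ
            dsimp only
            split_ifs with hif
            · omega
            · omega
          · exact pvCnt_eq_zero_of d lv l2 (L, a2 - 1) (fun p hp hk => by
              apply hnm p hp
              unfold pvKey at hk
              injection hk with hk1 hk2
              exact ⟨hk1, Or.inl hk2⟩)
          · exact pvCnt_eq_zero_of d lv l2 (L, b2 + 1) (fun p hp hk => by
              apply hnm p hp
              unfold pvKey at hk
              injection hk with hk1 hk2
              exact ⟨hk1, Or.inr hk2⟩)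
      | true =>
          have hlt : l2.length < l.length := by
            rcases pvScanA_length d lv L l.length l 0 a b false with h | h <;> rw [hr] at h
            · exact h
            · injection h with h1 h2
              injection h2 with h2 h3
              injection h3 with h3 h4
              simp at h4
          have hab2 : a2 ≤ b2 := by omega
          obtain ⟨ihres, A, B, hA1, hB1, ihcnt, hz1, hz2⟩ := ih l2 a2 b2 (by omega) hab2
          simp only [if_true]
          refine ⟨ihres, A, B, by omega, by omega, ?_, hz1, hz2⟩
          intro κ
          have h1 := ihcnt κ
          have h2 := hs3 κ
          obtain ⟨x, y⟩ := κ
          dsimp only at h1 h2 ⊢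
          split_ifs at h1 h2 ⊢ <;> omega

theorem pvOuterA_phi (d lv : Bool) (fuel : Nat) (l : List (Int × Int)) (res : Int)
    (hfuel : l.length < fuel) :
    pvOuterA d lv fuel l res =
      res + pvPhi (pvCnt (l.map (pvKey d lv))) (PySem.Set.ofList (l.map (pvKey d lv))) := by
  induction fuel generalizing l res with
  | zero => omega
  | succ fuel ih =>
      simp only [pvOuterA]
      by_cases h : l = []
      · rw [dif_pos h]
        subst h
        simp [pvPhi, PySem.Set.ofList]
      · rw [dif_neg h]
        rcases hr : pvInnerA d lv (pvIdx lv (l.getLast h)) (l.dropLast.length + 1) l.dropLast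
            (pvIdx d (l.getLast h)) (pvIdx d (l.getLast h)) res with ⟨l2, res2⟩
        dsimp only
        have hpos : 0 < l.length := List.length_pos_of_ne_nil h
        set p0 := l.getLast h with hp0
        obtain ⟨hres, A, B, hA1, hB1, hcnt, hz1, hz2⟩ :=
          pvInnerA_spec d lv (pvIdx lv p0) (l.dropLast.length + 1) l.dropLast
            (pvIdx d p0) (pvIdx d p0) res (by omega) (le_refl _)
        rw [hr] at hres hcnt hz1 hz2
        dsimp only at hres hcnt hz1 hz2
        have hlen2 : l2.length ≤ l.dropLast.length := by
          have := pvInnerA_length d lv (pvIdx lv p0) (l.dropLast.length + 1) l.dropLast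
            (pvIdx d p0) (pvIdx d p0) res
          rw [hr] at this
          exact this
        have hdl : l.dropLast.length = l.length - 1 := List.length_dropLast
        have hl : l.dropLast ++ [p0] = l := List.dropLast_append_getLast h
        have hcons : ∀ κ : Int × Int, pvCnt (l.map (pvKey d lv)) κ =
            pvCnt (l.dropLast.map (pvKey d lv)) κ +
              (if κ = (pvIdx lv p0, pvIdx d p0) then 1 else 0) := by
          intro κ
          conv_lhs => rw [← hl]
          unfold pvCnt
          rw [List.map_append, List.count_append, List.map_singleton, List.count_cons,
            List.count_nil]
          have hkk : pvKey d lv p0 = (pvIdx lv p0, pvIdx d p0) := rfl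
          rw [hkk]
          by_cases hk : κ = (pvIdx lv p0, pvIdx d p0)
          · subst hk
            simp
          · have hb : ((pvIdx lv p0, pvIdx d p0) == κ) = false := by
              simp only [beq_eq_false_iff_ne, ne_eq]
              exact fun e => hk e.symm
            rw [hb]
            simp [hk]
        have hc2 : ∀ κ : Int × Int, pvCnt (l2.map (pvKey d lv)) κ =
            pvCnt (l.map (pvKey d lv)) κ -
              (if κ.1 = pvIdx lv p0 ∧ A ≤ κ.2 ∧ κ.2 ≤ B then 1 else 0) := by
          intro κ
          have h1 := hcnt κ
          have h2 := hcons κ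
          obtain ⟨x, y⟩ := κ
          simp only [Prod.mk.injEq] at h1 h2 ⊢
          split_ifs at h1 h2 ⊢ <;> omega
        have hc0A : pvCnt (l.map (pvKey d lv)) (pvIdx lv p0, A - 1) = 0 := by
          have h1 := hc2 (pvIdx lv p0, A - 1)
          dsimp only at h1
          split_ifs at h1 <;> omega
        have hc0B : pvCnt (l.map (pvKey d lv)) (pvIdx lv p0, B + 1) = 0 := by
          have h1 := hc2 (pvIdx lv p0, B + 1)
          dsimp only at h1
          split_ifs at h1 <;> omega
        have hmem : ((pvIdx lv p0 : Int), A) ∈ PySem.Set.ofList (l.map (pvKey d lv)) := by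
          rw [PySem.Set.mem_ofList]
          rw [← pvCnt_pos]
          have h1 := hc2 (pvIdx lv p0, A)
          have h2 := pvCnt_nonneg (l2.map (pvKey d lv)) (pvIdx lv p0, A)
          dsimp only at h1
          split_ifs at h1 <;> omega
        have hdrop := pvPhi_drop (pvCnt (l.map (pvKey d lv))) (pvCnt (l2.map (pvKey d lv)))
          (PySem.Set.ofList (l.map (pvKey d lv))) (pvIdx lv p0) A B (le_trans hA1 hB1)
          hc2 (fun κ => pvCnt_nonneg _ _) hc0A hc0B hmem
          (PySem.Set.nodup_ofList _)
        have hsub := pvPhi_subset (pvCnt (l2.map (pvKey d lv)))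
          (PySem.Set.ofList (l2.map (pvKey d lv))) (PySem.Set.ofList (l.map (pvKey d lv)))
          (PySem.Set.nodup_ofList _) (PySem.Set.nodup_ofList _)
          (fun κ hκ => by
            rw [PySem.Set.mem_ofList] at hκ ⊢
            rw [← pvCnt_pos] at hκ ⊢
            have h1 := hc2 κ
            split_ifs at h1 <;> omega)
          (fun κ => pvCnt_nonneg _ _)
          (fun κ hκ hκn => by
            rw [PySem.Set.mem_ofList] at hκn
            exact (pvCnt_zero _ _).mpr hκn)
        rw [ih l2 res2 (by omega), hres, hsub]
        omega

theorem pvIdxB_eq_pvIdx (c : Prop) [Decidable c] (p : Int × Int) :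
    pvIdxB (if c then 1 else 0) p = pvIdx (decide c) p := by
  by_cases h : c <;> simp [pvIdxB, pvIdx, h]

theorem pvAlt_phi (nrm : List Int) (l : List (Int × Int)) :
    extractSide_alt nrm l =
      pvPhi (pvCnt (l.map (pvKey (decide (PySem.List.pyGetD nrm 0 0 ≠ 0)) (decide (PySem.List.pyGetD nrm 1 0 ≠ 0)))))
        (PySem.Set.ofList (l.map (pvKey (decide (PySem.List.pyGetD nrm 0 0 ≠ 0)) (decide (PySem.List.pyGetD nrm 1 0 ≠ 0))))) := by
  unfold extractSide_alt
  simp only [pvIdxB_eq_pvIdx]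
  set d : Bool := decide (PySem.List.pyGetD nrm 0 0 ≠ 0) with hd
  set lv : Bool := decide (PySem.List.pyGetD nrm 1 0 ≠ 0) with hlv
  have h1 : l.foldl (fun c p =>
      let k := (pvIdx lv p, pvIdx d p)
      c.insert k (c.getD k 0 + 1)) PySem.Dict.empty
      = PySem.Dict.counter (l.map (pvKey d lv)) := by
    rw [← PySem.Dict.foldl_insert_getD_add_one_eq_counter, List.foldl_map]
    rfl
  simp only [h1]
  rw [PySem.Dict.items_counter, PySem.List.foldl_add, List.map_map]
  unfold pvPhi pvCnt
  simp [PySem.Dict.getD_counter, Function.comp_def]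

-- ===== VERDICT (by name: the statement is the Claim_ definition above) =====
theorem extractSide_spec : Claim_equal_extractSide := by
  intro nrm l _ _
  unfold Spec_extractSide extractSide
  rw [pvAlt_phi]
  rw [pvOuterA_phi _ _ (l.length + 1) l 0 (by omega)]
  ring
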